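-- pv_equiv track=rewrite | github.com/LiuPeiP-CS/Hybrid-Multi-Stages-Decoding-for-Few-Shot-NER-with-Entity-Aware-Contrastive-Learning | Data/Corpus.py | _convert_label_to_BIEOS_
-- ===== SOURCE A (Python) =====
-- def _convert_label_to_BIEOS_(labels):
--     """
--     :param labels: 原始句子中，每个词序列的标签列表
--     :return: 原始序列标签的span标注，即用于entity-span的检测
--     """
--     res = []
--     label_list = ['O'] + labels + ['O'] # 添加的前后两个，表示的是cls和sep的标签
--
--     for i in range(1, len(label_list)-1): # 只考察中间的labels
--         if label_list[i] == 'O':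
--             res.append('O')
--             continue
--         if label_list[i] != label_list[i-1] and label_list[i] != label_list[i+1]:
--             res.append('S')
--         elif label_list[i] != label_list[i-1] and label_list[i] == label_list[i+1]:
--             res.append('B')
--         elif label_list[i] == label_list[i-1] and label_list[i] != label_list[i+1]:
--             res.append("E")
--         elif label_list[i] == label_list[i-1] and label_list[i] == label_list[i+1]:
--             res.append("I")
--         else:
--             raise ValueError("Some bugs exist in your code!")
--     return res
-- ===== SOURCE B (Python) =====
-- def _convert_label_to_BIEOS_(labels):
--     # Run-based rewrite: split labels into maximal runs of equal values and tag each
--     # run at once ('O'*k for an O-run, 'S' for a singleton, 'B'+'I'*(k-2)+'E' otherwise).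
--     res = []
--     i = 0
--     n = len(labels)
--     while i < n:
--         j = i
--         while j < n and labels[j] == labels[i]:
--             j += 1
--         k = j - i
--         if labels[i] == 'O':
--             res.extend(['O'] * k)
--         elif k == 1:
--             res.append('S')
--         else:
--             res.extend(['B'] + ['I'] * (k - 2) + ['E'])
--         i = j
--     return res
-- ===== Notes on version B (the rewrite author's own statement) =====
-- stated objective: simpler
-- what changed: Replaces the sentinel-padded per-index three-way neighbour comparison with a single scan over maximal runs of equal labels, tagging each run wholesale (O-run, singleton S, or B/I.../E).
import Mathlib
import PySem

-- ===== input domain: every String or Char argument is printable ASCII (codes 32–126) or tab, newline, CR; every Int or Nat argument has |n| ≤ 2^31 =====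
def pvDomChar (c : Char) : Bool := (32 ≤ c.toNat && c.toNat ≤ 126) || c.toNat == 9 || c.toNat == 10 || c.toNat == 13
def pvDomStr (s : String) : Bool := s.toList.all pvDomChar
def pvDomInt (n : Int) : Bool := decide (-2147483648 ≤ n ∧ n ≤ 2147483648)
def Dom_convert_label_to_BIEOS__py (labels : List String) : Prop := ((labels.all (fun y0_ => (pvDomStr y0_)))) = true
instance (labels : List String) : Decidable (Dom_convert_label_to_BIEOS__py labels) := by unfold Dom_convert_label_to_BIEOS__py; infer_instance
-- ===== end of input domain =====

-- B replaces A's sentinel-padded per-index neighbour comparison by a single scan over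
-- maximal runs of equal labels (objective: simpler decomposition; same return value).

-- ===== PORT A =====
-- literal port of A: pad with 'O' on both sides, loop i over range(1, len-1),
-- compare label_list[i] with its two neighbours.  The trailing `raise ValueError`
-- branch of A is unreachable (the four elif conditions are exhaustive), so the last
-- branch is ported as the final `elif` appending "I".
def convert_label_to_BIEOS__py (labels : List String) : List String :=
  let label_list := ["O"] ++ labels ++ ["O"]
  (PySem.List.pyRange 1 ((label_list.length : Int) - 1) 1).foldl
    (fun res i =>
      if PySem.List.pyGetD label_list i "" = "O" then res ++ ["O"]
      else if PySem.List.pyGetD label_list i "" ≠ PySem.List.pyGetD label_list (i - 1) "" ∧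
              PySem.List.pyGetD label_list i "" ≠ PySem.List.pyGetD label_list (i + 1) "" then res ++ ["S"]
      else if PySem.List.pyGetD label_list i "" ≠ PySem.List.pyGetD label_list (i - 1) "" ∧
              PySem.List.pyGetD label_list i "" = PySem.List.pyGetD label_list (i + 1) "" then res ++ ["B"]
      else if PySem.List.pyGetD label_list i "" = PySem.List.pyGetD label_list (i - 1) "" ∧
              PySem.List.pyGetD label_list i "" ≠ PySem.List.pyGetD label_list (i + 1) "" then res ++ ["E"]
      else res ++ ["I"])
    []

-- ===== PORT B =====
-- pvTakeRun x l = (number of leading elements of l equal to x, the remainder)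
-- (the inner `while j < n and labels[j] == labels[i]` scan of Source B)
def pvTakeRun (x : String) : List String → Nat × List String
  | [] => (0, [])
  | y :: ys => if y = x then ((pvTakeRun x ys).1 + 1, (pvTakeRun x ys).2) else (0, y :: ys)

-- termination measure for pvAltGo (the remainder of a run is no longer than the input)
theorem pvTakeRun_snd_length (x : String) (l : List String) : (pvTakeRun x l).2.length ≤ l.length := by
  induction l with
  | nil => simp [pvTakeRun]
  | cons y ys ih =>
      simp only [pvTakeRun]
      split
      · exact Nat.le_succ_of_le ih
      · simp

-- outer while loop of Source B: emit the tags of the leading maximal run, recurse on the rest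
def pvAltGo : List String → List String
  | [] => []
  | x :: xs =>
    (if x = "O" then List.replicate ((pvTakeRun x xs).1 + 1) "O"
     else if (pvTakeRun x xs).1 = 0 then ["S"]
     else "B" :: List.replicate ((pvTakeRun x xs).1 - 1) "I" ++ ["E"]) ++ pvAltGo (pvTakeRun x xs).2
termination_by l => l.length
decreasing_by
  exact Nat.lt_succ_of_le (pvTakeRun_snd_length x xs)

def convert_label_to_BIEOS__py_alt (labels : List String) : List String := pvAltGo labels

-- ===== PRECONDITION & SPEC =====
def Spec_convert_label_to_BIEOS__py (labels : List String) (out : List String) : Prop := out = convert_label_to_BIEOS__py_alt labels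
instance (labels : List String) (out : List String) : Decidable (Spec_convert_label_to_BIEOS__py labels out) := by unfold Spec_convert_label_to_BIEOS__py; infer_instance

-- ===== CLAIM (what is proved, stated in full; the proofs are below) =====
def Claim_equal_convert_label_to_BIEOS__py : Prop := ∀ (labels : List String), Dom_convert_label_to_BIEOS__py labels → Spec_convert_label_to_BIEOS__py labels (convert_label_to_BIEOS__py labels)

-- ===== LEMMAS AND PROOFS =====

-- the tag A computes at one position, as a function of (prev, cur, next)
def pvTag (prev c nxt : String) : String :=
  if c = "O" then "O"
  else if c ≠ prev ∧ c ≠ nxt then "S"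
  else if c ≠ prev ∧ c = nxt then "B"
  else if c = prev ∧ c ≠ nxt then "E"
  else "I"

-- A's loop as a left-to-right window recursion carrying the previous label
def pvAuxA : String → List String → List String
  | _, [] => []
  | prev, c :: rest => pvTag prev c (rest.headD "O") :: pvAuxA c rest

theorem pvWindow : ∀ (l : List String) (prev : String),
    List.map (fun k : Nat =>
        pvTag ((prev :: (l ++ ["O"])).getD k "") ((prev :: (l ++ ["O"])).getD (k + 1) "")
          ((prev :: (l ++ ["O"])).getD (k + 2) ""))
      (List.range l.length) = pvAuxA prev l := by
  intro l
  induction l with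
  | nil => intro prev; simp [pvAuxA]
  | cons c rest ih =>
    intro prev
    rw [List.length_cons, List.range_succ_eq_map, List.map_cons, List.map_map]
    rw [show pvAuxA prev (c :: rest) = pvTag prev c (rest.headD "O") :: pvAuxA c rest from rfl]
    congr 1
    · cases rest <;> simp [List.getD_cons_zero, List.getD_cons_succ]
    · rw [← ih c]
      refine List.map_congr_left fun k hk => ?_
      simp only [Function.comp_apply, Nat.succ_eq_add_one]
      rw [show k + 1 + 2 = (k + 2) + 1 from by omega]
      simp [List.cons_append, List.getD_cons_succ]

theorem pvA_eq_aux (labels : List String) :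
    convert_label_to_BIEOS__py labels = pvAuxA "O" labels := by
  simp only [convert_label_to_BIEOS__py, List.cons_append, List.nil_append]
  rw [PySem.List.foldl_congr_mem _ _
      (fun (res : List String) (i : Int) =>
        res ++ [pvTag (PySem.List.pyGetD ("O" :: (labels ++ ["O"])) (i - 1) "")
                 (PySem.List.pyGetD ("O" :: (labels ++ ["O"])) i "")
                 (PySem.List.pyGetD ("O" :: (labels ++ ["O"])) (i + 1) "")]) []
      (by
        intro acc i _
        simp only [pvTag]
        split_ifs <;> rfl)]
  rw [PySem.List.foldl_append_singleton_eq_map]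
  rw [List.nil_append, PySem.List.pyRange_one]
  rw [show ((((("O" :: (labels ++ ["O"])).length : Int) - 1) - 1).toNat) = labels.length from by
        simp [List.length_cons, List.length_append]]
  rw [List.map_map, ← pvWindow labels "O"]
  refine List.map_congr_left fun k hk => ?_
  simp only [Function.comp_apply]
  rw [show (1 : Int) + (k : Int) - 1 = ((k : Nat) : Int) from by ring,
      show (1 : Int) + (k : Int) = ((k + 1 : Nat) : Int) from by push_cast; ring,
      show ((k + 1 : Nat) : Int) + 1 = ((k + 2 : Nat) : Int) from by push_cast; ring]
  rw [PySem.List.pyGetD_natCast, PySem.List.pyGetD_natCast, PySem.List.pyGetD_natCast]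

theorem pvTakeRun_decomp (x : String) : ∀ (l : List String) (k : Nat) (rest : List String),
    pvTakeRun x l = (k, rest) → l = List.replicate k x ++ rest := by
  intro l
  induction l with
  | nil => intro k rest h; simp [pvTakeRun] at h; simp [h.1.symm, h.2.symm]
  | cons y ys ih =>
    intro k rest h
    by_cases hy : y = x
    · subst hy
      simp only [pvTakeRun, if_pos rfl] at h
      obtain ⟨h1, h2⟩ := Prod.mk.injEq .. ▸ h
      cases k with
      | zero => omega
      | succ m =>
        have hm : (pvTakeRun y ys).1 = m := by omega
        have := ih m rest (by rw [Prod.ext_iff]; exact ⟨hm, h2⟩)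
        simp [List.replicate_succ, ← this]
    · simp only [pvTakeRun, if_neg hy] at h
      obtain ⟨h1, h2⟩ := Prod.mk.injEq .. ▸ h
      simp [← h1, ← h2]

theorem pvTakeRun_head (x : String) : ∀ (l : List String) (k : Nat) (rest : List String),
    pvTakeRun x l = (k, rest) → ∀ c, rest.head? = some c → c ≠ x := by
  intro l
  induction l with
  | nil => intro k rest h c hc; simp [pvTakeRun] at h; rw [h.2] at hc; simp at hc
  | cons y ys ih =>
    intro k rest h c hc
    by_cases hy : y = x
    · subst hy
      simp only [pvTakeRun, if_pos rfl] at h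
      obtain ⟨h1, h2⟩ := Prod.mk.injEq .. ▸ h
      exact ih (pvTakeRun y ys).1 rest (by rw [Prod.ext_iff]; exact ⟨rfl, h2⟩) c hc
    · simp only [pvTakeRun, if_neg hy] at h
      obtain ⟨h1, h2⟩ := Prod.mk.injEq .. ▸ h
      rw [← h2] at hc
      simp only [List.head?_cons, Option.some.injEq] at hc
      rw [hc] at hy
      exact hy

theorem pvAltGo_cons (x : String) (xs : List String) (k : Nat) (rest : List String)
    (h : pvTakeRun x xs = (k, rest)) :
    pvAltGo (x :: xs) =
      (if x = "O" then List.replicate (k + 1) "O"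
       else if k = 0 then ["S"]
       else "B" :: List.replicate (k - 1) "I" ++ ["E"]) ++ pvAltGo rest := by
  rw [pvAltGo, h]

theorem pvAuxA_O_run (m : Nat) : ∀ (prev : String) (rest : List String),
    pvAuxA prev ("O" :: (List.replicate m "O" ++ rest)) =
      "O" :: (List.replicate m "O" ++ pvAuxA "O" rest) := by
  induction m with
  | zero =>
    intro prev rest
    simp only [List.replicate, List.nil_append]
    rw [show pvAuxA prev ("O" :: rest) = pvTag prev "O" (rest.headD "O") :: pvAuxA "O" rest from rfl]
    simp [pvTag]
  | succ m ih =>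
    intro prev rest
    rw [List.replicate_succ, List.cons_append]
    rw [show pvAuxA prev ("O" :: "O" :: (List.replicate m "O" ++ rest)) =
          pvTag prev "O" (("O" :: (List.replicate m "O" ++ rest)).headD "O")
            :: pvAuxA "O" ("O" :: (List.replicate m "O" ++ rest)) from rfl]
    rw [ih "O" rest]
    simp [pvTag]

theorem pvAuxA_run_mid (m : Nat) : ∀ (x : String) (rest : List String),
    x ≠ "O" → rest.headD "O" ≠ x →
    pvAuxA x (x :: (List.replicate m x ++ rest)) =
      List.replicate m "I" ++ ("E" :: pvAuxA x rest) := by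
  induction m with
  | zero =>
    intro x rest hx hr
    simp only [List.replicate, List.nil_append]
    rw [show pvAuxA x (x :: rest) = pvTag x x (rest.headD "O") :: pvAuxA x rest from rfl]
    have hr' : ¬ x = rest.head?.getD "O" := by
      cases rest with
      | nil => exact fun he => hx he
      | cons a as => exact fun he => hr he.symm
    simp [pvTag, hx, hr']
  | succ m ih =>
    intro x rest hx hr
    rw [List.replicate_succ, List.cons_append]
    rw [show pvAuxA x (x :: x :: (List.replicate m x ++ rest)) =
          pvTag x x ((x :: (List.replicate m x ++ rest)).headD "O")
            :: pvAuxA x (x :: (List.replicate m x ++ rest)) from rfl]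
    rw [ih x rest hx hr]
    simp [pvTag, hx, List.replicate_succ]

theorem pvAux_eq_altGo : ∀ (n : Nat) (l : List String), l.length ≤ n → ∀ (prev : String),
    (∀ c, l.head? = some c → prev ≠ c ∨ c = "O") → pvAuxA prev l = pvAltGo l := by
  intro n
  induction n with
  | zero =>
    intro l hl prev _
    cases l with
    | nil => simp [pvAuxA, pvAltGo]
    | cons x xs => simp at hl
  | succ n ih =>
    intro l hl prev hH
    cases l with
    | nil => simp [pvAuxA, pvAltGo]
    | cons x xs =>
      rcases hkr : pvTakeRun x xs with ⟨k, rest⟩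
      have hxs : xs = List.replicate k x ++ rest := pvTakeRun_decomp x xs k rest hkr
      have hne : ∀ c, rest.head? = some c → c ≠ x := pvTakeRun_head x xs k rest hkr
      have hrlen : rest.length ≤ n := by
        have h1 := pvTakeRun_snd_length x xs
        rw [hkr] at h1
        have h2 : xs.length ≤ n := by
          simp only [List.length_cons] at hl; omega
        exact le_trans h1 h2
      rw [pvAltGo_cons x xs k rest hkr]
      by_cases hxO : x = "O"
      · subst hxO
        rw [hxs, pvAuxA_O_run]
        rw [ih rest hrlen "O" (fun c _ => by
          by_cases hcO : c = "O"
          · exact Or.inr hcO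
          · exact Or.inl (fun he => hcO he.symm))]
        simp [List.replicate_succ]
      · have hprev : prev ≠ x := by
          rcases hH x rfl with h | h
          · exact h
          · exact absurd h hxO
        have hrhead : rest.headD "O" ≠ x := by
          cases rest with
          | nil => exact fun he => hxO he.symm
          | cons c cs => exact hne c rfl
        have hIHrest : pvAuxA x rest = pvAltGo rest :=
          ih rest hrlen x (fun c hc => Or.inl (Ne.symm (hne c hc)))
        cases k with
        | zero =>
          have hxr : xs = rest := by simpa using hxs
          rw [hxr]
          rw [show pvAuxA prev (x :: rest) = pvTag prev x (rest.headD "O") :: pvAuxA x rest from rfl]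
          rw [hIHrest]
          have h1 : x ≠ prev := Ne.symm hprev
          have h2 : ¬ x = rest.head?.getD "O" := by
            cases rest with
            | nil => exact fun he => hxO he
            | cons a as => exact fun he => hrhead he.symm
          simp [pvTag, hxO, h1, h2]
        | succ m =>
          rw [hxs, List.replicate_succ, List.cons_append]
          rw [show pvAuxA prev (x :: x :: (List.replicate m x ++ rest)) =
                pvTag prev x ((x :: (List.replicate m x ++ rest)).headD "O")
                  :: pvAuxA x (x :: (List.replicate m x ++ rest)) from rfl]
          rw [pvAuxA_run_mid m x rest hxO hrhead]
          rw [hIHrest]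
          have h1 : x ≠ prev := Ne.symm hprev
          simp [pvTag, hxO, h1]

theorem pvAux_eq_alt (labels : List String) : pvAuxA "O" labels = pvAltGo labels :=
  pvAux_eq_altGo labels.length labels le_rfl "O" (fun c _ => by
    by_cases h : c = "O"
    · exact Or.inr h
    · exact Or.inl (fun he => h he.symm))

-- ===== VERDICT (by name: the statement is the Claim_ definition above) =====
theorem convert_label_to_BIEOS__py_spec : Claim_equal_convert_label_to_BIEOS__py := by
  intro labels _
  unfold Spec_convert_label_to_BIEOS__py convert_label_to_BIEOS__py_alt
  rw [pvA_eq_aux, pvAux_eq_alt]
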